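-- pv_equiv track=rewrite | github.com/gahjelle/advent_of_code | python/src/2023/14_parabolic_reflector_dish/aoc202314.py | roll_east
-- ===== SOURCE A (Python) =====
-- def roll_east(rolling, obstacles):
--     """Roll all rolling stones east."""
--     max_col = max(col for _, col in rolling | obstacles) + 1
--
--     rolled = set()
--     for row, col in sorted(rolling, key=lambda pos: -pos[1]):
--         while (
--             col < max_col - 1
--             and (row, col + 1) not in obstacles
--             and (row, col + 1) not in rolled
--         ):
--             col += 1
--
--         rolled.add((row, col))
--     return rolled
-- ===== SOURCE B (Python) =====
-- def roll_east(rolling, obstacles):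
--     """Roll all rolling stones east (closed-form placement: each stone lands at
--     min(nearest obstacle east, previously placed stone in its row) - 1; no
--     cell-by-cell simulation and no membership walks over the rolled set)."""
--     max_col = max(col for _, col in rolling | obstacles) + 1
--
--     last = {}  # row -> column of the westernmost stone placed so far in that row
--     rolled = set()
--     for row, col in sorted(rolling, key=lambda pos: -pos[1]):
--         barrier = max_col
--         for obs_row, obs_col in obstacles:
--             if obs_row == row and col < obs_col < barrier:
--                 barrier = obs_col
--         final = min(barrier, last.get(row, max_col)) - 1
--         last[row] = final
--         rolled.add((row, final))
--     return rolled
-- ===== Notes on version B (the rewrite author's own statement) =====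
-- stated objective: faster
-- what changed: Each stone's resting column is computed in closed form as min(nearest obstacle to the east, previously placed stone in its row) - 1, replacing A's cell-by-cell eastward slide that repeatedly tests membership in the growing rolled set.
import Mathlib
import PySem

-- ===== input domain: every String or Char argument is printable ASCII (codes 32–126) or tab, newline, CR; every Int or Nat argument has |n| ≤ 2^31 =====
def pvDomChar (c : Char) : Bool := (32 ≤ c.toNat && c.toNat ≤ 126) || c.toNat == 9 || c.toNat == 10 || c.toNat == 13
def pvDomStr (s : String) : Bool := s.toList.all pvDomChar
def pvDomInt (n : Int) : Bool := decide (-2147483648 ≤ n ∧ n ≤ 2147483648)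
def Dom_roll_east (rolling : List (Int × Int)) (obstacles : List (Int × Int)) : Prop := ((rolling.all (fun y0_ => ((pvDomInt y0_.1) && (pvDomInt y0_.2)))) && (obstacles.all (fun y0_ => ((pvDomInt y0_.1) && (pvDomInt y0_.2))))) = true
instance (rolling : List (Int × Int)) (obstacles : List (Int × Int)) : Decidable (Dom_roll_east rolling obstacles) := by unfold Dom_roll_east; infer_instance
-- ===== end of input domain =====

-- B replaces A's cell-by-cell eastward slide (membership walks in the rolled set) by a
-- closed-form placement min(nearest obstacle east, last stone placed in the row) - 1.


-- ===== PORT A =====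
-- the while loop: slide one cell east while not at the east wall and the next cell
-- holds neither an obstacle nor an already-rolled stone
def pvSlideA (obstacles rolled : List (Int × Int)) (row maxCol col : Int) : Int :=
  if h : col < maxCol - 1 ∧ (row, col + 1) ∉ obstacles ∧ (row, col + 1) ∉ rolled then
    pvSlideA obstacles rolled row maxCol (col + 1)
  else
    col
termination_by (maxCol - 1 - col).toNat
decreasing_by omega

def roll_east (rolling : List (Int × Int)) (obstacles : List (Int × Int)) : List (Int × Int) :=
  let rollingS : PySem.Set (Int × Int) := PySem.Set.ofList rolling
  let obstaclesS : PySem.Set (Int × Int) := PySem.Set.ofList obstacles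
  let maxCol : Int :=
    (PySem.List.max? ((PySem.Set.union rollingS obstaclesS).map Prod.snd) (fun c => c)).getD 0 + 1
  (PySem.List.sorted rollingS (fun pos => -pos.2) false).foldl
    (fun rolled p => PySem.Set.add rolled (p.1, pvSlideA obstaclesS rolled p.1 maxCol p.2))
    PySem.Set.empty

-- ===== PORT B =====
-- the inner for loop of Source B: running minimum of obstacle columns in this row east of col
def pvBarrier (obstacles : List (Int × Int)) (row col barrier0 : Int) : Int :=
  obstacles.foldl
    (fun barrier q => if q.1 = row ∧ col < q.2 ∧ q.2 < barrier then q.2 else barrier)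
    barrier0

def roll_east_alt (rolling : List (Int × Int)) (obstacles : List (Int × Int)) : List (Int × Int) :=
  let rollingS : PySem.Set (Int × Int) := PySem.Set.ofList rolling
  let obstaclesS : PySem.Set (Int × Int) := PySem.Set.ofList obstacles
  let maxCol : Int :=
    (PySem.List.max? ((PySem.Set.union rollingS obstaclesS).map Prod.snd) (fun c => c)).getD 0 + 1
  ((PySem.List.sorted rollingS (fun pos => -pos.2) false).foldl
    (fun st p =>
      let barrier := pvBarrier obstaclesS p.1 p.2 maxCol
      let final := min barrier (st.1.getD p.1 maxCol) - 1
      (st.1.insert p.1 final, PySem.Set.add st.2 (p.1, final)))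
    ((PySem.Dict.empty : PySem.Dict Int Int), PySem.Set.empty)).2

-- ===== PRECONDITION & SPEC =====
-- Pre_ excludes only the input with both sets empty, on which A's max() raises ValueError.
def Pre_roll_east (rolling : List (Int × Int)) (obstacles : List (Int × Int)) : Prop :=
  rolling ≠ [] ∨ obstacles ≠ []
instance (rolling : List (Int × Int)) (obstacles : List (Int × Int)) : Decidable (Pre_roll_east rolling obstacles) := by unfold Pre_roll_east; infer_instance

def pvWitness_roll_east : (List (Int × Int)) × (List (Int × Int)) :=
  ([(0, 0), (0, 2), (1, 1)], [(0, 4), (1, 0)])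

def Spec_roll_east (rolling : List (Int × Int)) (obstacles : List (Int × Int)) (out : List (Int × Int)) : Prop := out = roll_east_alt rolling obstacles
instance (rolling : List (Int × Int)) (obstacles : List (Int × Int)) (out : List (Int × Int)) : Decidable (Spec_roll_east rolling obstacles out) := by unfold Spec_roll_east; infer_instance

-- ===== CLAIM (what is proved, stated in full; the proofs are below) =====
def Claim_equal_roll_east : Prop := ∀ (rolling : List (Int × Int)) (obstacles : List (Int × Int)), Dom_roll_east rolling obstacles → Pre_roll_east rolling obstacles → Spec_roll_east rolling obstacles (roll_east rolling obstacles)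

-- ===== LEMMAS AND PROOFS =====

-- pvBarrier computes the least obstacle column in row r strictly east of c (default B0)
theorem pvBarrier_spec (r c : Int) : ∀ (obs : List (Int × Int)) (B0 : Int), c < B0 →
    pvBarrier obs r c B0 ≤ B0 ∧ c < pvBarrier obs r c B0 ∧
    (pvBarrier obs r c B0 = B0 ∨ (r, pvBarrier obs r c B0) ∈ obs) ∧
    (∀ q ∈ obs, q.1 = r → c < q.2 → pvBarrier obs r c B0 ≤ q.2) := by
  intro obs
  induction obs with
  | nil =>
    intro B0 h
    refine ⟨le_refl _, h, Or.inl rfl, ?_⟩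
    intro q hq; simp at hq
  | cons q tl ih =>
    intro B0 h
    have hstep : pvBarrier (q :: tl) r c B0
        = pvBarrier tl r c (if q.1 = r ∧ c < q.2 ∧ q.2 < B0 then q.2 else B0) := rfl
    by_cases hcond : q.1 = r ∧ c < q.2 ∧ q.2 < B0
    · have h1 : c < q.2 := hcond.2.1
      obtain ⟨hle, hgt, hmem, hmin⟩ := ih q.2 h1
      rw [hstep, if_pos hcond]
      refine ⟨by omega, hgt, ?_, ?_⟩
      · right
        rcases hmem with heq | hm
        · have hq : (r, q.2) = q := Prod.ext hcond.1.symm rfl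
          rw [heq, hq]
          exact List.mem_cons_self
        · exact List.mem_cons_of_mem _ hm
      · intro p hp hpr hpc
        rcases List.mem_cons.1 hp with hp' | hp'
        · subst hp'; omega
        · exact hmin p hp' hpr hpc
    · obtain ⟨hle, hgt, hmem, hmin⟩ := ih B0 h
      rw [hstep, if_neg hcond]
      refine ⟨hle, hgt, ?_, ?_⟩
      · rcases hmem with heq | hm
        · exact Or.inl heq
        · exact Or.inr (List.mem_cons_of_mem _ hm)
      · intro p hp hpr hpc
        rcases List.mem_cons.1 hp with hp' | hp'
        · subst hp'
          have hBq : B0 ≤ p.2 := by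
            by_contra hlt
            exact hcond ⟨hpr, hpc, by omega⟩
          omega
        · exact hmin p hp' hpr hpc

-- the slide loop stops exactly at T when every cell in (c, T] is free and T+1 is blocked
theorem pvSlideA_eq (obs R : List (Int × Int)) (r M T : Int) (hTM : T ≤ M - 1)
    (hstop : T = M - 1 ∨ (r, T + 1) ∈ obs ∨ (r, T + 1) ∈ R) :
    ∀ (n : Nat) (c : Int), (T - c).toNat = n → c ≤ T →
      (∀ q : Int, c < q → q ≤ T → (r, q) ∉ obs ∧ (r, q) ∉ R) →
      pvSlideA obs R r M c = T := by
  intro n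
  induction n with
  | zero =>
    intro c hn hc hfree
    have hcT : c = T := by omega
    subst hcT
    rw [pvSlideA]
    rw [dif_neg]
    rintro ⟨h1, h2, h3⟩
    rcases hstop with h | h | h
    · omega
    · exact h2 h
    · exact h3 h
  | succ n ih =>
    intro c hn hc hfree
    have hcT : c < T := by omega
    have hfc := hfree (c + 1) (by omega) (by omega)
    rw [pvSlideA, dif_pos ⟨by omega, hfc.1, hfc.2⟩]
    exact ih (c + 1) (by omega) (by omega) (fun q h1 h2 => hfree q (by omega) h2)

-- main loop invariant: A's fold over the rolled set equals B's fold over (last, rolled)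
theorem pv_main (obsS : List (Int × Int)) (M : Int) :
    ∀ (ss : List (Int × Int)) (d : PySem.Dict Int Int) (R : List (Int × Int)),
      (∀ p ∈ ss, p.2 < M) →
      List.Pairwise (fun a b : Int × Int => b.2 ≤ a.2) ss →
      ss.Nodup →
      (∀ r q, (r, q) ∈ R → d.getD r M ≤ q) →
      (∀ r l, d.get? r = some l → (r, l) ∈ R) →
      (∀ p ∈ ss, p.2 < d.getD p.1 M) →
      (∀ r l, d.get? r = some l → l < M) →
      ss.foldl (fun rolled p => PySem.Set.add rolled (p.1, pvSlideA obsS rolled p.1 M p.2)) R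
      = (ss.foldl (fun st p =>
            (st.1.insert p.1 (min (pvBarrier obsS p.1 p.2 M) (st.1.getD p.1 M) - 1),
             PySem.Set.add st.2 (p.1, min (pvBarrier obsS p.1 p.2 M) (st.1.getD p.1 M) - 1)))
          (d, R)).2 := by
  intro ss
  induction ss with
  | nil => intro d R _ _ _ _ _ _ _; rfl
  | cons p tl ih =>
    intro d R hcols hsort hnd inv1 inv2 inv3 inv4
    obtain ⟨r, c⟩ := p
    have hcM : c < M := hcols (r, c) List.mem_cons_self
    have hcl : c < d.getD r M := inv3 (r, c) List.mem_cons_self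
    obtain ⟨hbM, hcb, hbmem, hbmin⟩ := pvBarrier_spec r c obsS M hcM
    set b := pvBarrier obsS r c M with hb
    set l := d.getD r M with hl
    set f := min b l - 1 with hf
    have hcf : c ≤ f := by omega
    have hfl : f < l := by omega
    have hfb : f ≤ b - 1 := by omega
    -- the slide lands exactly at f
    have hslide : pvSlideA obsS R r M c = f := by
      apply pvSlideA_eq obsS R r M f (by omega) ?_ (f - c).toNat c rfl hcf ?_
      · -- cell f+1 is blocked (or f is the east wall)
        by_cases hlb : l ≤ b
        · cases hd : d.get? r with
          | none =>
            have : l = M := by rw [hl, PySem.Dict.getD_eq_get?_getD, hd]; rfl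
            left; omega
          | some l0 =>
            have hle : l = l0 := by rw [hl, PySem.Dict.getD_eq_get?_getD, hd]; rfl
            right; right
            have hfll : f + 1 = l := by omega
            rw [hfll, hle]
            exact inv2 r l0 hd
        · rcases hbmem with heq | hm
          · left; omega
          · right; left
            have hfbb : f + 1 = b := by omega
            rw [hfbb]; exact hm
      · -- every cell in (c, f] is free
        intro q hq1 hq2
        constructor
        · intro hmem
          have := hbmin (r, q) hmem rfl hq1
          omega
        · intro hmem
          have := inv1 r q hmem
          omega
    -- (r, f) is new in R, so Set.add appends
    have hnotin : (r, f) ∉ R := by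
      intro hmem
      have := inv1 r f hmem
      omega
    have hadd : PySem.Set.add R (r, f) = R ++ [(r, f)] := PySem.Set.add_of_not_mem hnotin
    -- one step of each fold
    rw [List.foldl_cons, List.foldl_cons]
    show List.foldl _ (PySem.Set.add R (r, pvSlideA obsS R r M c)) tl
        = (List.foldl _ (d.insert r f, PySem.Set.add R (r, f)) tl).2
    rw [hslide, hadd]
    -- apply the induction hypothesis to the new state
    apply ih (d.insert r f) (R ++ [(r, f)])
    · exact fun q hq => hcols q (List.mem_cons_of_mem _ hq)
    · exact hsort.of_cons
    · exact hnd.of_cons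
    · -- inv1
      intro r' q hq
      rcases List.mem_append.1 hq with hq' | hq'
      · by_cases hr : r' = r
        · subst hr
          have := inv1 r' q hq'
          rw [PySem.Dict.getD_insert, if_pos rfl]
          omega
        · rw [PySem.Dict.getD_insert, if_neg hr]
          exact inv1 r' q hq'
      · have hq2 : (r', q) = (r, f) := List.mem_singleton.1 hq'
        have hr : r' = r := (Prod.mk.injEq _ _ _ _ ▸ hq2).1
        have hqf : q = f := (Prod.mk.injEq _ _ _ _ ▸ hq2).2
        subst hr; subst hqf
        rw [PySem.Dict.getD_insert, if_pos rfl]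
    · -- inv2
      intro r' l' hget
      by_cases hr : r' = r
      · subst hr
        rw [PySem.Dict.get?_insert, if_pos rfl] at hget
        injection hget with hlf
        subst hlf
        exact List.mem_append.2 (Or.inr (List.mem_singleton.2 rfl))
      · rw [PySem.Dict.get?_insert, if_neg hr] at hget
        exact List.mem_append.2 (Or.inl (inv2 r' l' hget))
    · -- inv3
      intro p hp
      by_cases hr : p.1 = r
      · rw [PySem.Dict.getD_insert, if_pos hr]
        have hple : p.2 ≤ c := List.rel_of_pairwise_cons hsort hp
        have hpne : p ≠ (r, c) := fun heq => (List.nodup_cons.1 hnd).1 (heq ▸ hp)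
        have hne2 : p.2 ≠ c := fun heq => hpne (Prod.ext hr heq)
        omega
      · rw [PySem.Dict.getD_insert, if_neg hr]
        exact inv3 p (List.mem_cons_of_mem _ hp)
    · -- inv4
      intro r' l' hget
      by_cases hr : r' = r
      · subst hr
        rw [PySem.Dict.get?_insert, if_pos rfl] at hget
        injection hget with hlf
        omega
      · rw [PySem.Dict.get?_insert, if_neg hr] at hget
        exact inv4 r' l' hget

-- ===== VERDICT (by name: the statement is the Claim_ definition above) =====
theorem roll_east_spec : Claim_equal_roll_east := by
  intro rolling obstacles _hdom hpre
  unfold Spec_roll_east roll_east roll_east_alt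
  simp only []
  set rollingS := PySem.Set.ofList rolling with hrS
  set obstaclesS := PySem.Set.ofList obstacles with hoS
  set u := (PySem.Set.union rollingS obstaclesS).map Prod.snd with hu
  -- the union is nonempty (Pre_), so max() returns its true maximum
  have hne : u ≠ [] := by
    rcases hpre with h | h
    · obtain ⟨x, xs, rfl⟩ := List.exists_cons_of_ne_nil h
      intro habs
      have hx : x ∈ rollingS := (PySem.Set.mem_ofList _ _).2 List.mem_cons_self
      have hx2 : x.2 ∈ u := List.mem_map_of_mem ((PySem.Set.mem_union _ _ _).2 (Or.inl hx))
      rw [habs] at hx2; simp at hx2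
    · obtain ⟨x, xs, rfl⟩ := List.exists_cons_of_ne_nil h
      intro habs
      have hx : x ∈ obstaclesS := (PySem.Set.mem_ofList _ _).2 List.mem_cons_self
      have hx2 : x.2 ∈ u := List.mem_map_of_mem ((PySem.Set.mem_union _ _ _).2 (Or.inr hx))
      rw [habs] at hx2; simp at hx2
  cases hmax : PySem.List.max? u (fun c => c) with
  | none => exact absurd ((PySem.List.max?_eq_none_iff _ _).1 hmax) hne
  | some m =>
    simp only [Option.getD_some]
    have hmax' := PySem.List.max?_isMax hmax
    have hroll : ∀ p ∈ rollingS, p.2 < m + 1 := by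
      intro p hp
      have hm : p.2 ∈ u := List.mem_map_of_mem ((PySem.Set.mem_union _ _ _).2 (Or.inl hp))
      have := hmax' p.2 hm
      omega
    have hmem : ∀ p ∈ PySem.List.sorted rollingS (fun pos : Int × Int => -pos.2) false,
        p ∈ rollingS := fun p hp => (PySem.List.mem_sorted _ _ _ _).1 hp
    apply pv_main obstaclesS (m + 1) _ PySem.Dict.empty PySem.Set.empty
    · exact fun p hp => hroll p (hmem p hp)
    · have hpw := PySem.List.sorted_pairwise rollingS (fun pos : Int × Int => -pos.2)
      exact hpw.imp (by intro a b h; omega)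
    · exact ((PySem.List.sorted_perm rollingS (fun pos : Int × Int => -pos.2) false).nodup_iff).2
        (PySem.Set.nodup_ofList _)
    · intro r q hq; simp [PySem.Set.empty] at hq
    · intro r l hget; rw [PySem.Dict.get?_empty] at hget; cases hget
    · intro p hp
      rw [PySem.Dict.getD_empty]
      exact hroll p (hmem p hp)
    · intro r l hget; rw [PySem.Dict.get?_empty] at hget; cases hget
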